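-- pv_equiv track=rewrite | github.com/jordan-gillard/algorithm_training | codility_tests/test5/alg.py | solution
-- ===== SOURCE A (Python) =====
-- from typing import List
--
-- def solution(A: List[int]):
--     max_run = 1
--     current_run = 1
--     for i in range(len(A) - 1):
--         if abs(A[i] - A[i+1]) == 1:
--             current_run += 1
--         else:
--             current_run = 1
--         max_run = max(max_run, current_run)
--     return max_run
-- ===== SOURCE B (Python) =====
-- def solution(A):
--     diffs = [abs(x - y) == 1 for x, y in zip(A, A[1:])]
--     best = 0
--     i = 0
--     n = len(diffs)
--     while i < n:
--         j = i
--         while j < n and diffs[j]: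
--             j += 1
--         best = max(best, j - i)
--         i = j + 1
--     return best + 1
-- ===== Notes on version B (the rewrite author's own statement) =====
-- stated objective: alternative
-- what changed: Replaces the running-counter/running-max scan with a build-then-reduce pipeline: first materialise the boolean adjacent-difference list, then scan it run by run (inner loop consumes one maximal run of Trues at a time) taking the longest True run, returning best+1.
import Mathlib
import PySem

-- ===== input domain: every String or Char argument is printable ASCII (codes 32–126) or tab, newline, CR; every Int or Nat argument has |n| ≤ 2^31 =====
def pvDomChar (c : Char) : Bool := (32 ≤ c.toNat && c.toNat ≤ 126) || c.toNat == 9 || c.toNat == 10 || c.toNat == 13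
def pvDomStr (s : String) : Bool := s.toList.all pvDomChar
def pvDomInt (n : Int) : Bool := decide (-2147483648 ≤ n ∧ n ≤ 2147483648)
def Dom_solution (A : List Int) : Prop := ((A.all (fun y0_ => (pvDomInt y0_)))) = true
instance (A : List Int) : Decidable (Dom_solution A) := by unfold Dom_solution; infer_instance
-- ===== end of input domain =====

-- B differs from A only in structure (diff list built first, then scanned run by run); same value everywhere.
-- ===== PORT A =====
-- literal port of A: single pass over indices, running current/max counters
def solution (A : List Int) : Int :=
  (PySem.List.pyRange 0 ((A.length : Int) - 1) 1).foldl
    (fun (st : Int × Int) i =>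
      let current_run : Int :=
        if |PySem.List.pyGetD A i 0 - PySem.List.pyGetD A (i + 1) 0| = 1 then st.2 + 1 else 1
      (max st.1 current_run, current_run))
    (1, 1) |>.1

-- ===== PORT B =====
-- inner `while j < n and diffs[j]` loop: consume one maximal run of Trues, return (its length, the rest)
def takeTrues : List Bool → Nat × List Bool
  | [] => (0, [])
  | false :: r => (0, false :: r)
  | true :: r => let p := takeTrues r; (p.1 + 1, p.2)

theorem takeTrues_len : ∀ l : List Bool, (takeTrues l).2.length ≤ l.length := by
  intro l
  induction l with
  | nil => simp [takeTrues]
  | cons b r ih => cases b <;> simp [takeTrues] <;> omega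

-- outer `while i < n` loop: best True-run length over the whole list
def bestRun : List Bool → Int
  | [] => 0
  | b :: r =>
      let p := takeTrues (b :: r)
      max (p.1 : Int) (bestRun p.2.tail)
termination_by l => l.length
decreasing_by
  have h := takeTrues_len (b :: r)
  simp only [List.length_tail]
  simp at h ⊢
  omega

def solution_alt (A : List Int) : Int :=
  let diffs := (A.zip (PySem.List.slice A (some 1) none)).map (fun p => decide (|p.1 - p.2| = 1))
  bestRun diffs + 1

-- ===== PRECONDITION & SPEC =====
def Spec_solution (A : List Int) (out : Int) : Prop := out = solution_alt A
instance (A : List Int) (out : Int) : Decidable (Spec_solution A out) := by unfold Spec_solution; infer_instance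

-- ===== CLAIM (what is proved, stated in full; the proofs are below) =====
def Claim_equal_solution : Prop := ∀ (A : List Int), Dom_solution A → Spec_solution A (solution A)

-- ===== LEMMAS AND PROOFS =====

-- bestRun's unfolding on a nonempty list
theorem bestRun_cons (b : Bool) (r : List Bool) :
    bestRun (b :: r) = max ((takeTrues (b :: r)).1 : Int) (bestRun (takeTrues (b :: r)).2.tail) := by
  rw [bestRun]

theorem bestRun_nonneg : ∀ l : List Bool, 0 ≤ bestRun l := by
  intro l
  cases l with
  | nil => simp [bestRun]
  | cons b r => rw [bestRun_cons]; exact le_max_of_le_left (by positivity)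

-- index fold over adjacent pairs = fold over the zipped pair list
theorem idx_fold {β : Type} (h : β → Int → Int → β) :
    ∀ (A : List Int) (s : β),
      (List.range (A.length - 1)).foldl (fun st k => h st (A.getD k 0) (A.getD (k + 1) 0)) s
        = (A.zip A.tail).foldl (fun st p => h st p.1 p.2) s := by
  intro A
  induction A with
  | nil => intro s; simp
  | cons a A' ih =>
    intro s
    cases A' with
    | nil => simp
    | cons b rest =>
      simp only [List.length_cons, Nat.add_sub_cancel, List.range_succ_eq_map,
        List.foldl_cons, List.foldl_map, List.getD_cons_zero, List.getD_cons_succ,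
        List.tail_cons, List.zip_cons_cons]
      have := ih (h s a b)
      simp only [List.length_cons, Nat.add_sub_cancel, List.getD_cons_succ, List.tail_cons] at this
      exact this

-- step of A's loop, on the boolean diff
def stepA (st : Int × Int) (d : Bool) : Int × Int :=
  (max st.1 (if d then st.2 + 1 else 1), if d then st.2 + 1 else 1)

-- A's scan characterised by leading-true-run decomposition
theorem scan_char : ∀ (l : List Bool) (m c : Int), 1 ≤ c → c ≤ m →
    (l.foldl stepA (m, c)).1
      = max m (max (c + ((takeTrues l).1 : Int)) (bestRun (takeTrues l).2.tail + 1)) := by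
  intro l
  induction l with
  | nil =>
    intro m c h1 h2
    simp [takeTrues, bestRun]
    omega
  | cons b r ih =>
    intro m c h1 h2
    cases b with
    | false =>
      have step : stepA (m, c) false = (max m 1, 1) := by simp [stepA]
      have hm : max m 1 = m := by omega
      simp only [List.foldl_cons, step, hm, takeTrues, List.tail_cons]
      rw [ih m 1 le_rfl (by omega)]
      cases r with
      | nil => simp [takeTrues, bestRun]; omega
      | cons b' r' =>
        rw [bestRun_cons b' r']
        have hT : (0 : Int) ≤ ((takeTrues (b' :: r')).1 : Int) := by positivity
        have hB := bestRun_nonneg (takeTrues (b' :: r')).2.tail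
        omega
    | true =>
      have step : stepA (m, c) true = (max m (c + 1), c + 1) := by simp [stepA]
      simp only [List.foldl_cons, step, takeTrues]
      rw [ih (max m (c + 1)) (c + 1) (by omega) (by omega)]
      have hT : (0 : Int) ≤ ((takeTrues r).1 : Int) := by positivity
      push_cast
      omega

-- A's index loop rewritten as a fold over the zipped adjacent-pair list
theorem solution_as_pairs (A : List Int) :
    solution A
      = ((A.zip A.tail).foldl (fun st p => stepA st (decide (|p.1 - p.2| = 1))) (1, 1)).1 := by
  unfold solution
  rw [PySem.List.pyRange_one]
  have hn : (((A.length : Int) - 1) - 0).toNat = A.length - 1 := by omega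
  rw [hn, List.foldl_map]
  have hfun : (fun (st : Int × Int) (k : Nat) =>
        (fun (st : Int × Int) (i : Int) =>
          let current_run : Int :=
            if |PySem.List.pyGetD A i 0 - PySem.List.pyGetD A (i + 1) 0| = 1 then st.2 + 1 else 1
          (max st.1 current_run, current_run)) st ((0 : Int) + (k : Int)))
      = fun (st : Int × Int) (k : Nat) => stepA st (decide (|A.getD k 0 - A.getD (k + 1) 0| = 1)) := by
    funext st k
    have h1 : ((0 : Int) + (k : Int)) = ((k : Nat) : Int) := zero_add _
    have h2 : ((k : Int) + 1) = (((k + 1 : Nat)) : Int) := (Nat.cast_add_one k).symm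
    simp only [h1, h2, PySem.List.pyGetD_natCast, stepA, decide_eq_true_eq]
  rw [hfun, idx_fold (fun st x y => stepA st (decide (|x - y| = 1))) A (1, 1)]

-- B's port with the slice and the fold-over-map normalised away
theorem alt_eq (A : List Int) :
    solution_alt A
      = bestRun ((A.zip A.tail).map (fun p => decide (|p.1 - p.2| = 1))) + 1 := by
  unfold solution_alt
  rw [PySem.List.slice_from_one]

theorem pairs_fold_eq_diffs_fold (A : List Int) :
    (A.zip A.tail).foldl (fun st p => stepA st (decide (|p.1 - p.2| = 1))) (1, 1)
      = ((A.zip A.tail).map (fun p => decide (|p.1 - p.2| = 1))).foldl stepA (1, 1) := by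
  rw [List.foldl_map]

-- ===== VERDICT (by name: the statement is the Claim_ definition above) =====
theorem solution_spec : Claim_equal_solution := by
  intro A _
  unfold Spec_solution
  rw [alt_eq, solution_as_pairs, pairs_fold_eq_diffs_fold]
  rw [scan_char _ 1 1 le_rfl le_rfl]
  cases hd : (A.zip A.tail).map (fun p => decide (|p.1 - p.2| = 1)) with
  | nil => simp [takeTrues, bestRun]
  | cons b r =>
    rw [bestRun_cons b r]
    have hT : (0 : Int) ≤ ((takeTrues (b :: r)).1 : Int) := by positivity
    have hB := bestRun_nonneg (takeTrues (b :: r)).2.tail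
    omega
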